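-- pv_equiv track=rewrite | github.com/Lovable-xlz/nonebot_plugin_nerdle_autoplay | click_nerdle.py | nerdle_feedback
-- ===== SOURCE A (Python) =====
-- def nerdle_feedback(answer: str, guess: str):
--     result = []
--     used = [False] * 8
--
--     # correct
--     for i in range(8):
--         if guess[i] == answer[i]:
--             result.append({"char": guess[i], "status": "correct"})
--             used[i] = True
--         else:
--             result.append(None)
--
--     # present / absent
--     for i in range(8):
--         if result[i] is not None:
--             continue
--
--         found = False
--         for j in range(8):
--             if not used[j] and guess[i] == answer[j]:
--                 used[j] = True
--                 found = True
--                 break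
--
--         result[i] = {
--             "char": guess[i],
--             "status": "present" if found else "absent"
--         }
--
--     return result
-- ===== SOURCE B (Python) =====
-- def nerdle_feedback(answer: str, guess: str):
--     # Phase 1: which positions are exact matches.
--     correct = [guess[i] == answer[i] for i in range(8)]
--
--     # Count answer characters at the non-correct positions.
--     remaining = {}
--     for i in range(8):
--         if not correct[i]:
--             c = answer[i]
--             remaining[c] = remaining.get(c, 0) + 1
--
--     # Single left-to-right pass over the guess, consuming from the count table.
--     out = []
--     for i in range(8):
--         c = guess[i]
--         if correct[i]:
--             out.append({"char": c, "status": "correct"})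
--         elif remaining.get(c, 0) > 0:
--             remaining[c] = remaining[c] - 1
--             out.append({"char": c, "status": "present"})
--         else:
--             out.append({"char": c, "status": "absent"})
--     return out
-- ===== Notes on version B (the rewrite author's own statement) =====
-- stated objective: simpler
-- what changed: The nested scan-and-mark over answer positions (with a used[] mask) in the present/absent phase is replaced by a count table of answer characters at non-correct positions, built once and decremented in a single left-to-right pass over the guess.
import Mathlib
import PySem

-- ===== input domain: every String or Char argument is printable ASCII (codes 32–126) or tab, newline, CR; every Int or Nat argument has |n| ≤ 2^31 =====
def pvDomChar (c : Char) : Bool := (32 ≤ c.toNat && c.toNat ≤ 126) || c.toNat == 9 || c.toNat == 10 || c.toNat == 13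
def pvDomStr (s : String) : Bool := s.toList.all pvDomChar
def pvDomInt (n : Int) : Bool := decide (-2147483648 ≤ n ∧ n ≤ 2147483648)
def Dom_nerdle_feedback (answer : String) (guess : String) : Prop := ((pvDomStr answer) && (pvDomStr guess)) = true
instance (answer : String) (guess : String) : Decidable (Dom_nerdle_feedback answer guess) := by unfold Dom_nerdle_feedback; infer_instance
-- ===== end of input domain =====

-- B replaces A's inner scan-and-mark over the answer with a count table of the
-- non-correct answer characters, consumed in one left-to-right pass (objective: simpler).

-- ===== PORT A =====
-- literal transliteration of A: phase 1 appends greens/None and marks `used`;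
-- phase 2 scans `used` for the first unconsumed matching answer position.
def nerdle_feedback (answer : String) (guess : String) : List (List (String × String)) :=
  let a := answer.toList
  let g := guess.toList
  let p1 := (List.range 8).foldl
    (fun (st : List (Option (List (String × String))) × List Bool) i =>
      if g.getD i ' ' = a.getD i ' ' then
        (st.1 ++ [some [("char", String.ofList [g.getD i ' ']), ("status", "correct")]], st.2.set i true)
      else
        (st.1 ++ [none], st.2))
    ([], List.replicate 8 false)
  let p2 := (List.range 8).foldl
    (fun (st : List (Option (List (String × String))) × List Bool) i =>
      match st.1.getD i none with
      | some _ => st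
      | none =>
        match (List.range 8).find? (fun j => !st.2.getD j false && decide (g.getD i ' ' = a.getD j ' ')) with
        | some j =>
          (st.1.set i (some [("char", String.ofList [g.getD i ' ']), ("status", "present")]), st.2.set j true)
        | none =>
          (st.1.set i (some [("char", String.ofList [g.getD i ' ']), ("status", "absent")]), st.2))
    p1
  p2.1.map (fun o => o.getD [])

-- ===== PORT B =====
-- literal transliteration of B (Source B): correct-flags, a count table of answer
-- chars at non-correct positions, then one pass consuming from the table.
def nerdle_feedback_alt (answer : String) (guess : String) : List (List (String × String)) :=
  let a := answer.toList
  let g := guess.toList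
  let correct := (List.range 8).map (fun i => decide (g.getD i ' ' = a.getD i ' '))
  let remaining := (List.range 8).foldl
    (fun (d : PySem.Dict Char Int) i =>
      if correct.getD i true then d
      else d.insert (a.getD i ' ') (d.getD (a.getD i ' ') 0 + 1))
    PySem.Dict.empty
  let fin := (List.range 8).foldl
    (fun (st : List (List (String × String)) × PySem.Dict Char Int) i =>
      if correct.getD i true then
        (st.1 ++ [[("char", String.ofList [g.getD i ' ']), ("status", "correct")]], st.2)
      else if st.2.getD (g.getD i ' ') 0 > 0 then
        (st.1 ++ [[("char", String.ofList [g.getD i ' ']), ("status", "present")]], st.2.insert (g.getD i ' ') (st.2.getD (g.getD i ' ') 0 - 1))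
      else
        (st.1 ++ [[("char", String.ofList [g.getD i ' ']), ("status", "absent")]], st.2))
    ([], remaining)
  fin.1

-- ===== PRECONDITION & SPEC =====
-- Pre_: Python A indexes answer[i] and guess[i] for i = 0..7, so it raises
-- IndexError unless both strings have at least 8 characters.
def Pre_nerdle_feedback (answer : String) (guess : String) : Prop :=
  8 ≤ answer.toList.length ∧ 8 ≤ guess.toList.length
instance (answer : String) (guess : String) : Decidable (Pre_nerdle_feedback answer guess) := by
  unfold Pre_nerdle_feedback; infer_instance
def pvWitness_nerdle_feedback : String × String := ("12+34=46", "13+33=46")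

def Spec_nerdle_feedback (answer : String) (guess : String) (out : List (List (String × String))) : Prop := out = nerdle_feedback_alt answer guess
instance (answer : String) (guess : String) (out : List (List (String × String))) : Decidable (Spec_nerdle_feedback answer guess out) := by unfold Spec_nerdle_feedback; infer_instance

-- ===== CLAIM (what is proved, stated in full; the proofs are below) =====
def Claim_equal_nerdle_feedback : Prop := ∀ (answer : String) (guess : String), Dom_nerdle_feedback answer guess → Pre_nerdle_feedback answer guess → Spec_nerdle_feedback answer guess (nerdle_feedback answer guess)

-- ===== LEMMAS AND PROOFS =====

-- the three loop bodies of port A and the two of port B, named for the proofs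
def pvStepP1 (a g : List Char) (st : List (Option (List (String × String))) × List Bool) (i : Nat) :
    List (Option (List (String × String))) × List Bool :=
  if g.getD i ' ' = a.getD i ' ' then
    (st.1 ++ [some [("char", String.ofList [g.getD i ' ']), ("status", "correct")]], st.2.set i true)
  else
    (st.1 ++ [none], st.2)

def pvStepA (a g : List Char) (st : List (Option (List (String × String))) × List Bool) (i : Nat) :
    List (Option (List (String × String))) × List Bool :=
  match st.1.getD i none with
  | some _ => st
  | none =>
    match (List.range 8).find? (fun j => !st.2.getD j false && decide (g.getD i ' ' = a.getD j ' ')) with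
    | some j =>
      (st.1.set i (some [("char", String.ofList [g.getD i ' ']), ("status", "present")]), st.2.set j true)
    | none =>
      (st.1.set i (some [("char", String.ofList [g.getD i ' ']), ("status", "absent")]), st.2)

def pvCorrect (a g : List Char) : List Bool :=
  (List.range 8).map (fun i => decide (g.getD i ' ' = a.getD i ' '))

def pvStepC (a g : List Char) (d : PySem.Dict Char Int) (i : Nat) : PySem.Dict Char Int :=
  if (pvCorrect a g).getD i true then d
  else d.insert (a.getD i ' ') (d.getD (a.getD i ' ') 0 + 1)

def pvStepB (a g : List Char) (st : List (List (String × String)) × PySem.Dict Char Int) (i : Nat) :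
    List (List (String × String)) × PySem.Dict Char Int :=
  if (pvCorrect a g).getD i true then
    (st.1 ++ [[("char", String.ofList [g.getD i ' ']), ("status", "correct")]], st.2)
  else if st.2.getD (g.getD i ' ') 0 > 0 then
    (st.1 ++ [[("char", String.ofList [g.getD i ' ']), ("status", "present")]], st.2.insert (g.getD i ' ') (st.2.getD (g.getD i ' ') 0 - 1))
  else
    (st.1 ++ [[("char", String.ofList [g.getD i ' ']), ("status", "absent")]], st.2)

-- fold over `range n` preserving an index-parametrised invariant
theorem pvFoldlRangeInv {S : Type _} (step : S → Nat → S) (Inv : Nat → S → Prop) (s0 : S) :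
    ∀ (n : Nat), Inv 0 s0 → (∀ k s, k < n → Inv k s → Inv (k+1) (step s k)) →
    Inv n ((List.range n).foldl step s0)
  | 0, h0, _ => h0
  | (n+1), h0, hstep => by
      rw [List.range_succ, List.foldl_append]
      exact hstep n _ (Nat.lt_succ_self n)
        (pvFoldlRangeInv step Inv s0 n h0 (fun k s hk => hstep k s (Nat.lt_succ_of_lt hk)))

-- phase-1 result list of A, closed form
def pvRes1 (a g : List Char) : List (Option (List (String × String))) :=
  (List.range 8).map (fun i =>
    if g.getD i ' ' = a.getD i ' ' then
      some [("char", String.ofList [g.getD i ' ']), ("status", "correct")]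
    else none)

-- number of unconsumed answer positions holding character c
def pvCnt (a : List Char) (u : List Bool) (c : Char) : Nat :=
  ((List.range 8).filter (fun j => !u.getD j false && decide (c = a.getD j ' '))).length

-- flipping one passing index of a nodup list to failing drops the filter length by one
theorem pvFilterFlip {l : List Nat} (hnd : l.Nodup) {j : Nat} (hj : j ∈ l)
    {p p' : Nat → Bool} (hpj : p j = true) (hp'j : p' j = false)
    (hagree : ∀ x ∈ l, x ≠ j → p' x = p x) :
    (l.filter p').length + 1 = (l.filter p).length := by
  induction l with
  | nil => cases hj
  | cons b t ih =>
    rcases List.nodup_cons.mp hnd with ⟨hb, hndt⟩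
    rcases List.mem_cons.mp hj with rfl | hjt
    · have ht : t.filter p' = t.filter p := by
        apply List.filter_congr
        intro x hx
        exact hagree x (List.mem_cons_of_mem _ hx) (fun h => hb (h ▸ hx))
      simp [hpj, hp'j, ht]
    · have hbj : b ≠ j := fun h => hb (h ▸ hjt)
      have hpb : p' b = p b := hagree b (List.mem_cons_self ..) hbj
      have hrec := ih hndt hjt (fun x hx hxj => hagree x (List.mem_cons_of_mem _ hx) hxj)
      by_cases hc : p b = true
      · simp only [List.filter_cons, hc, if_true, hpb, List.length_cons]
        omega
      · simp only [Bool.not_eq_true] at hc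
        simp only [List.filter_cons, hc, if_false, hpb, Bool.false_eq_true]
        exact hrec

theorem pvPhase1 (a g : List Char) :
    ((List.range 8).foldl (pvStepP1 a g) ([], List.replicate 8 false)).1 = pvRes1 a g ∧
    ((List.range 8).foldl (pvStepP1 a g) ([], List.replicate 8 false)).2.length = 8 ∧
    ∀ j, j < 8 → ((List.range 8).foldl (pvStepP1 a g) ([], List.replicate 8 false)).2.getD j false
      = decide (g.getD j ' ' = a.getD j ' ') := by
  have H := pvFoldlRangeInv (pvStepP1 a g)
    (fun n st => st.1 = (List.range n).map (fun i =>
        if g.getD i ' ' = a.getD i ' ' then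
          some [("char", String.ofList [g.getD i ' ']), ("status", "correct")]
        else none) ∧
      st.2.length = 8 ∧
      ∀ j, j < 8 → st.2.getD j false = (decide (j < n) && decide (g.getD j ' ' = a.getD j ' ')))
    ([], List.replicate 8 false) 8
    (by
      refine ⟨by simp, by simp, ?_⟩
      intro j hj
      rw [List.getD_eq_getElem?_getD, List.getElem?_replicate, if_pos hj]
      simp)
    (by
      intro k st hk hInv
      obtain ⟨h1, h2, h3⟩ := hInv
      unfold pvStepP1
      by_cases hc : g.getD k ' ' = a.getD k ' '
      · have hcE := hc
        simp only [List.getD_eq_getElem?_getD] at hcE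
        rw [if_pos hc]
        refine ⟨by simp [h1, List.range_succ, hcE], by simp [h2], ?_⟩
        intro j hj
        by_cases hjk : j = k
        · subst hjk
          rw [List.getD_eq_getElem?_getD, List.getElem?_set_self (by rw [h2]; exact hj)]
          simp [hcE]
        · rw [List.getD_eq_getElem?_getD, List.getElem?_set_ne (fun h => hjk h.symm),
            ← List.getD_eq_getElem?_getD, h3 j hj,
            show (decide (j < k + 1)) = decide (j < k) from decide_eq_decide.mpr (by omega)]
      · have hcE := hc
        simp only [List.getD_eq_getElem?_getD] at hcE
        rw [if_neg hc]
        refine ⟨by simp [h1, List.range_succ, hcE], h2, ?_⟩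
        intro j hj
        rw [h3 j hj]
        by_cases hjk : j = k
        · subst hjk
          rw [decide_eq_false hc]
          simp
        · rw [show (decide (j < k + 1)) = decide (j < k) from decide_eq_decide.mpr (by omega)]
    )
  obtain ⟨h1, h2, h3⟩ := H
  refine ⟨h1, h2, ?_⟩
  intro j hj
  rw [h3 j hj]
  simp [hj]

theorem pvCounter (a g : List Char) (c : Char) :
    ((List.range 8).foldl (pvStepC a g) PySem.Dict.empty).getD c 0 =
    (((List.range 8).filter (fun j => !decide (g.getD j ' ' = a.getD j ' ') && decide (c = a.getD j ' '))).length : Int) := by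
  have H := pvFoldlRangeInv (pvStepC a g)
    (fun n d => ∀ c, d.getD c 0 =
      (((List.range n).filter (fun j => !decide (g.getD j ' ' = a.getD j ' ') && decide (c = a.getD j ' '))).length : Int))
    PySem.Dict.empty 8
    (by intro c; simp [PySem.Dict.getD_empty])
    (by
      intro k d hk hInv c
      unfold pvStepC pvCorrect
      rw [PySem.List.getD_map_range _ 8 k true hk]
      have hcE : g[k]?.getD ' ' = a[k]?.getD ' ' ↔ g.getD k ' ' = a.getD k ' ' := by
        rw [List.getD_eq_getElem?_getD, List.getD_eq_getElem?_getD]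
      by_cases hc : g.getD k ' ' = a.getD k ' '
      · have hd := decide_eq_true hc
        rw [if_pos hd, hInv c, List.range_succ, List.filter_append]
        simp [hcE.mpr hc]
      · have hd := decide_eq_false hc
        have hcN : ¬ g[k]?.getD ' ' = a[k]?.getD ' ' := fun h => hc (hcE.mp h)
        rw [if_neg (by rw [hd]; simp), PySem.Dict.getD_insert]
        by_cases hca : c = a.getD k ' '
        · rw [if_pos hca, hca, hInv (a.getD k ' '), List.range_succ, List.filter_append]
          simp [hcN]
        · have hcaE : ¬ c = a[k]?.getD ' ' := by
            rw [← List.getD_eq_getElem?_getD]; exact hca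
          rw [if_neg hca, hInv c, List.range_succ, List.filter_append]
          simp [hcN, hcaE]
    )
  exact H c

-- phase-2 invariant tying A's (result, used) to B's (out, remaining)
def pvInv2 (a g : List Char) (k : Nat)
    (s : (List (Option (List (String × String))) × List Bool) × (List (List (String × String)) × PySem.Dict Char Int)) : Prop :=
  s.1.1 = s.2.1.map some ++ (pvRes1 a g).drop k ∧
  s.2.1.length = k ∧
  s.1.2.length = 8 ∧
  ∀ c, s.2.2.getD c 0 = (pvCnt a s.1.2 c : Int)

theorem pvRes1_length (a g : List Char) : (pvRes1 a g).length = 8 := by simp [pvRes1]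

theorem pvRes1_getElem (a g : List Char) (k : Nat) (hk : k < 8) :
    (pvRes1 a g)[k]'(by rw [pvRes1_length]; exact hk) =
      (if g.getD k ' ' = a.getD k ' ' then
        some [("char", String.ofList [g.getD k ' ']), ("status", "correct")]
      else none) := by
  simp [pvRes1]

theorem pvStep2 (a g : List Char) (k : Nat)
    (s : (List (Option (List (String × String))) × List Bool) × (List (List (String × String)) × PySem.Dict Char Int))
    (hk : k < 8) (hInv : pvInv2 a g k s) :
    pvInv2 a g (k+1) (pvStepA a g s.1 k, pvStepB a g s.2 k) := by
  obtain ⟨hres, hlen, hulen, hcnt⟩ := hInv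
  have hk8 : k < (pvRes1 a g).length := by rw [pvRes1_length]; exact hk
  have hmaplen : (List.map some s.2.1).length = k := by simp [hlen]
  have hdrop : (pvRes1 a g).drop k = (pvRes1 a g)[k] :: (pvRes1 a g).drop (k+1) :=
    List.drop_eq_getElem_cons hk8
  have hget : s.1.1.getD k none = (pvRes1 a g)[k] := by
    rw [hres, List.getD_eq_getElem?_getD,
      List.getElem?_append_right (by rw [hmaplen]),
      hmaplen, Nat.sub_self, List.getElem?_drop, Nat.add_zero,
      List.getElem?_eq_getElem hk8]
    rfl
  have hcorrk : (pvCorrect a g).getD k true = decide (g.getD k ' ' = a.getD k ' ') :=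
    PySem.List.getD_map_range _ 8 k true hk
  by_cases hc : g.getD k ' ' = a.getD k ' '
  · -- correct position: A skips, B emits the green entry
    have hA : pvStepA a g s.1 k = s.1 := by
      unfold pvStepA
      rw [hget, pvRes1_getElem a g k hk, if_pos hc]
    have hB : pvStepB a g s.2 k =
        (s.2.1 ++ [[("char", String.ofList [g.getD k ' ']), ("status", "correct")]], s.2.2) := by
      unfold pvStepB
      rw [hcorrk, if_pos (decide_eq_true hc)]
    rw [hA, hB]
    refine ⟨?_, by simp [hlen], hulen, hcnt⟩
    rw [hres, hdrop, pvRes1_getElem a g k hk, if_pos hc]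
    simp
  · -- non-correct position
    have hd := decide_eq_false hc
    have hr1k : (pvRes1 a g)[k] = none := by
      rw [pvRes1_getElem a g k hk, if_neg hc]
    have hresk : s.1.1 = List.map some s.2.1 ++ (none :: (pvRes1 a g).drop (k+1)) := by
      rw [hres, hdrop, hr1k]
    have hsetres : ∀ (e : List (String × String)),
        s.1.1.set k (some e) = (s.2.1 ++ [e]).map some ++ (pvRes1 a g).drop (k+1) := by
      intro e
      rw [hresk, List.set_append, if_neg (by rw [hmaplen]; omega), hmaplen, Nat.sub_self]
      simp
    have hcntk : s.2.2.getD (g.getD k ' ') 0 = (pvCnt a s.1.2 (g.getD k ' ') : Int) :=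
      hcnt (g.getD k ' ')
    cases hfo : (List.range 8).find?
        (fun j => !s.1.2.getD j false && decide (g.getD k ' ' = a.getD j ' ')) with
    | none =>
      -- no unconsumed match: both sides emit absent
      have hzero : pvCnt a s.1.2 (g.getD k ' ') = 0 := by
        unfold pvCnt
        rw [List.filter_eq_nil_iff.mpr (List.find?_eq_none.mp hfo)]
        rfl
      have hA : pvStepA a g s.1 k =
          (s.1.1.set k (some [("char", String.ofList [g.getD k ' ']), ("status", "absent")]), s.1.2) := by
        unfold pvStepA
        rw [hget, hr1k]
        simp only []
        rw [hfo]
      have hB : pvStepB a g s.2 k =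
          (s.2.1 ++ [[("char", String.ofList [g.getD k ' ']), ("status", "absent")]], s.2.2) := by
        unfold pvStepB
        rw [hcorrk, if_neg (by rw [hd]; simp), if_neg (by rw [hcntk, hzero]; simp)]
      rw [hA, hB]
      refine ⟨hsetres _, by simp [hlen], hulen, hcnt⟩
    | some j =>
      -- consume answer position j: both sides emit present
      have hj8 : j < 8 := List.mem_range.mp (List.mem_of_find?_eq_some hfo)
      have hpj := List.find?_some hfo
      have huj : s.1.2.getD j false = false := by
        cases hb : s.1.2.getD j false
        · rfl
        · rw [hb] at hpj; simp at hpj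
      have hgaj : g.getD k ' ' = a.getD j ' ' := by
        have h2 := hpj
        rw [huj] at h2
        simp only [Bool.not_false, Bool.true_and] at h2
        exact of_decide_eq_true h2
      have hujset : (s.1.2.set j true).getD j false = true := by
        rw [List.getD_eq_getElem?_getD, List.getElem?_set_self (by rw [hulen]; exact hj8)]
        rfl
      have hpos : 0 < pvCnt a s.1.2 (g.getD k ' ') := by
        unfold pvCnt
        refine List.length_pos_of_mem (List.mem_filter.mpr ⟨List.mem_range.mpr hj8, ?_⟩)
        exact hpj
      have hA : pvStepA a g s.1 k =
          (s.1.1.set k (some [("char", String.ofList [g.getD k ' ']), ("status", "present")]), s.1.2.set j true) := by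
        unfold pvStepA
        rw [hget, hr1k]
        simp only []
        rw [hfo]
      have hB : pvStepB a g s.2 k =
          (s.2.1 ++ [[("char", String.ofList [g.getD k ' ']), ("status", "present")]],
            s.2.2.insert (g.getD k ' ') (s.2.2.getD (g.getD k ' ') 0 - 1)) := by
        unfold pvStepB
        rw [hcorrk, if_neg (by rw [hd]; simp), if_pos (by rw [hcntk]; exact_mod_cast hpos)]
      rw [hA, hB]
      refine ⟨hsetres _, by simp [hlen], by simp [hulen], ?_⟩
      intro c
      dsimp only
      rw [PySem.Dict.getD_insert]
      by_cases hcc : c = g.getD k ' '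
      · rw [if_pos hcc, hcc, hcntk]
        have hflip : pvCnt a (s.1.2.set j true) (g.getD k ' ') + 1 = pvCnt a s.1.2 (g.getD k ' ') := by
          unfold pvCnt
          refine pvFilterFlip List.nodup_range (List.mem_range.mpr hj8) ?_ ?_ ?_
          · exact hpj
          · rw [hujset]
            rfl
          · intro x _ hxj
            rw [List.getD_eq_getElem?_getD, List.getElem?_set_ne (fun h => hxj h.symm),
              ← List.getD_eq_getElem?_getD]
        omega
      · rw [if_neg hcc, hcnt c]
        have hsame : pvCnt a (s.1.2.set j true) c = pvCnt a s.1.2 c := by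
          unfold pvCnt
          apply congrArg List.length
          apply List.filter_congr
          intro x _
          by_cases hxj : x = j
          · have h2 : decide (c = a.getD j ' ') = false :=
              decide_eq_false (by rw [← hgaj]; exact hcc)
            rw [hxj, hujset, huj, h2]
            rfl
          · rw [List.getD_eq_getElem?_getD, List.getElem?_set_ne (fun h => hxj h.symm),
              ← List.getD_eq_getElem?_getD]
        rw [hsame]

theorem pvMain (a g : List Char) :
    (((List.range 8).foldl (pvStepA a g)
        ((List.range 8).foldl (pvStepP1 a g) ([], List.replicate 8 false))).1).map (fun o => o.getD []) =
    ((List.range 8).foldl (pvStepB a g)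
        ([], (List.range 8).foldl (pvStepC a g) PySem.Dict.empty)).1 := by
  obtain ⟨hp1, hplen, hpmask⟩ := pvPhase1 a g
  have hinit : pvInv2 a g 0
      (((List.range 8).foldl (pvStepP1 a g) ([], List.replicate 8 false)),
       (([] : List (List (String × String))), (List.range 8).foldl (pvStepC a g) PySem.Dict.empty)) := by
    refine ⟨by simpa using hp1, rfl, hplen, ?_⟩
    intro c
    have hfc : ∀ j ∈ List.range 8,
        (!decide (g.getD j ' ' = a.getD j ' ') && decide (c = a.getD j ' ')) =
        (!((List.range 8).foldl (pvStepP1 a g) ([], List.replicate 8 false)).2.getD j false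
          && decide (c = a.getD j ' ')) := by
      intro j hj
      rw [hpmask j (List.mem_range.mp hj)]
    rw [pvCounter a g c]
    unfold pvCnt
    rw [List.filter_congr hfc]
  have H := pvFoldlRangeInv
    (fun s k => (pvStepA a g s.1 k, pvStepB a g s.2 k)) (pvInv2 a g) _ 8 hinit
    (fun k s hk hs => pvStep2 a g k s hk hs)
  rw [PySem.List.foldl_prod_mk (f := pvStepA a g) (g := pvStepB a g)] at H
  obtain ⟨hres, hlen, _, _⟩ := H
  rw [hres, List.drop_eq_nil_of_le (le_of_eq (pvRes1_length a g))]
  simp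

-- ===== VERDICT (by name: the statement is the Claim_ definition above) =====
theorem nerdle_feedback_spec : Claim_equal_nerdle_feedback := by
  intro answer guess _ _
  show nerdle_feedback answer guess = nerdle_feedback_alt answer guess
  exact pvMain answer.toList guess.toList
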